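-- pv_equiv track=rewrite | github.com/thanhmai212/tuyen_tin | day4/exam/ex3.py | build_zigzag
-- ===== SOURCE A (Python) =====
-- def build_zigzag(N):
--     grid = [[0]*N for _ in range(N)]
--     num = 1
--     for s in range(2*N - 1):
--         r_min = max(0, s - (N - 1))
--         r_max = min(N - 1, s)
--         coords = []
--         for r in range(r_min, r_max + 1):
--             c = s - r
--             coords.append((r, c))
--         if s % 2 == 0:
--             coords.reverse()
--         for (r, c) in coords:
--             grid[r][c] = num
--             num += 1
--     return grid
-- ===== SOURCE B (Python) =====
-- def build_zigzag(N):
--     # closed-form per-cell numbering: no diagonal walk, no mutation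
--     def base(s):
--         # first number on anti-diagonal s
--         if s <= N:
--             return 1 + s * (s + 1) // 2
--         return N * N + 1 - (2 * N - 1 - s) * (2 * N - s) // 2
--
--     def cell(r, c):
--         s = r + c
--         if s % 2 == 1:
--             return base(s) + (r - max(0, s - (N - 1)))
--         return base(s) + (min(N - 1, s) - r)
--
--     return [[cell(r, c) for c in range(N)] for r in range(N)]
-- ===== Notes on version B (the rewrite author's own statement) =====
-- stated objective: alternative
-- what changed: B computes each cell's number directly from a closed-form formula (first number on its anti-diagonal plus a parity-dependent offset) in a row-major double comprehension, instead of A's walk over anti-diagonals building, reversing and writing coordinate lists into a mutable grid.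
import Mathlib
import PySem

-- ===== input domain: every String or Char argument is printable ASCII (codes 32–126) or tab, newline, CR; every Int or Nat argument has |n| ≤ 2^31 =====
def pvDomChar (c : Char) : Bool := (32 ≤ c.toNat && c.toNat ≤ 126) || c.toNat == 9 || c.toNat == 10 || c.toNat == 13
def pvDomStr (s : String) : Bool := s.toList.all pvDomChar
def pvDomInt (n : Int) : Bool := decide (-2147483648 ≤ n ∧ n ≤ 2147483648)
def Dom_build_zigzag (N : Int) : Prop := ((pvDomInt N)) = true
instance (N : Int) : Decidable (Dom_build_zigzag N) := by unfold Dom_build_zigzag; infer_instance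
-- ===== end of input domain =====

-- B numbers each cell directly with a closed-form formula on its anti-diagonal, instead of A's
-- diagonal walk with coordinate lists, reversal and in-place mutation (objective: alternative).

-- ===== PORT A =====
-- grid[r][c] = v ; the indices A uses here are always nonnegative and in range, where toNat is exact
def bzSet2 (g : List (List Int)) (r c : Int) (v : Int) : List (List Int) :=
  g.set r.toNat ((g.getD r.toNat []).set c.toNat v)

-- body of 'for (r, c) in coords'
def bzInner (st : List (List Int) × Int) (rc : Int × Int) : List (List Int) × Int :=
  (bzSet2 st.1 rc.1 rc.2 st.2, st.2 + 1)

-- body of 'for s in range(2*N - 1)'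
def bzDiag (N : Int) (st : List (List Int) × Int) (s : Int) : List (List Int) × Int :=
  let r_min := max 0 (s - (N - 1))
  let r_max := min (N - 1) s
  let coords := (PySem.List.pyRange r_min (r_max + 1) 1).map (fun r => (r, s - r))
  let coords := if PySem.Int.mod s 2 == 0 then coords.reverse else coords
  coords.foldl bzInner st

def build_zigzag (N : Int) : List (List Int) :=
  ((PySem.List.pyRange 0 (2 * N - 1) 1).foldl (bzDiag N)
    ((PySem.List.pyRange 0 N 1).map (fun _ => List.replicate N.toNat (0 : Int)), 1)).1

-- ===== PORT B =====
-- base(s): first number placed on anti-diagonal s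
def bzBase (N s : Int) : Int :=
  if s ≤ N then 1 + PySem.Int.floordiv (s * (s + 1)) 2
  else N * N + 1 - PySem.Int.floordiv ((2 * N - 1 - s) * (2 * N - s)) 2

-- cell(r, c)
def bzCell (N r c : Int) : Int :=
  let s := r + c
  if PySem.Int.mod s 2 == 1 then bzBase N s + (r - max 0 (s - (N - 1)))
  else bzBase N s + (min (N - 1) s - r)

def build_zigzag_alt (N : Int) : List (List Int) :=
  (PySem.List.pyRange 0 N 1).map (fun r => (PySem.List.pyRange 0 N 1).map (fun c => bzCell N r c))

-- ===== PRECONDITION & SPEC =====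
def Spec_build_zigzag (N : Int) (out : List (List Int)) : Prop := out = build_zigzag_alt N
instance (N : Int) (out : List (List Int)) : Decidable (Spec_build_zigzag N out) := by unfold Spec_build_zigzag; infer_instance

-- ===== CLAIM (what is proved, stated in full; the proofs are below) =====
def Claim_equal_build_zigzag : Prop := ∀ (N : Int), Dom_build_zigzag N → Spec_build_zigzag N (build_zigzag N)

-- ===== LEMMAS AND PROOFS =====

/-- abstract N×N grid given by a cell function -/
def gridOf (N : Int) (f : Int → Int → Int) : List (List Int) :=
  (PySem.List.pyRange 0 N 1).map (fun r => (PySem.List.pyRange 0 N 1).map (fun c => f r c))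

/-- cell function of A's partial grid once all diagonals < s have been written -/
def pf (N s : Int) (r c : Int) : Int := if r + c < s then bzCell N r c else 0

theorem gridOf_congr {N : Int} {f g : Int → Int → Int}
    (h : ∀ r c, 0 ≤ r → r < N → 0 ≤ c → c < N → f r c = g r c) :
    gridOf N f = gridOf N g := by
  unfold gridOf
  refine List.map_congr_left (fun r hr => ?_)
  refine List.map_congr_left (fun c hc => ?_)
  rw [PySem.List.mem_pyRange_one] at hr hc
  exact h r c hr.1 hr.2 hc.1 hc.2

theorem set2_gridOf {N : Int} {f : Int → Int → Int} {r c v : Int}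
    (hr0 : 0 ≤ r) (hrN : r < N) (hc0 : 0 ≤ c) (hcN : c < N) :
    bzSet2 (gridOf N f) r c v
      = gridOf N (fun r' c' => if r' = r ∧ c' = c then v else f r' c') := by
  have hlen : (PySem.List.pyRange 0 N 1).length = N.toNat := by
    simp [PySem.List.length_pyRange_one]
  have harg : ∀ i : Nat, i < (PySem.List.pyRange 0 N 1).length →
      (PySem.List.pyRange 0 N 1)[i]? = some ((i : Int)) := by
    intro i hi
    rw [List.getElem?_eq_getElem hi, PySem.List.getElem_pyRange_one]
    norm_num
  unfold bzSet2 gridOf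
  have hrow : ((PySem.List.pyRange 0 N 1).map
      (fun r => (PySem.List.pyRange 0 N 1).map (fun c => f r c))).getD r.toNat []
      = (PySem.List.pyRange 0 N 1).map (fun c => f r c) := by
    rw [List.getD_eq_getElem?_getD, List.getElem?_map, harg r.toNat (by omega)]
    simp only [Option.map_some, Option.getD_some]
    have : ((r.toNat : Nat) : Int) = r := by omega
    rw [this]
  rw [hrow]
  apply List.ext_getElem
  · simp
  · intro i h1 h2
    simp only [List.length_set, List.length_map] at h1 h2
    simp only [List.getElem_set, List.getElem_map, PySem.List.getElem_pyRange_one]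
    by_cases hi : r.toNat = i
    · rw [if_pos hi]
      apply List.ext_getElem
      · simp
      · intro j j1 j2
        simp only [List.length_set, List.length_map] at j1 j2
        simp only [List.getElem_set, List.getElem_map, PySem.List.getElem_pyRange_one]
        by_cases hj : c.toNat = j
        · rw [if_pos hj, if_pos (by constructor <;> omega)]
        · rw [if_neg hj, if_neg (by rw [hlen] at h1 j1; omega)]
          have : (0:Int) + (i:Int) = r := by omega
          rw [this]
    · rw [if_neg hi]
      apply List.map_congr_left
      intro c' _
      rw [if_neg (by rw [hlen] at h1; omega)]

theorem write_fold (N s : Int) (val : Int → Int) :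
    ∀ (rs : List Int) (f : Int → Int → Int) (num : Int),
      (∀ r ∈ rs, 0 ≤ r ∧ r < N ∧ 0 ≤ s - r ∧ s - r < N) →
      (∀ k (hk : k < rs.length), val rs[k] = num + k) →
      (rs.map (fun r => (r, s - r))).foldl bzInner (gridOf N f, num)
        = (gridOf N (fun r' c' => if r' ∈ rs ∧ c' = s - r' then val r' else f r' c'),
           num + rs.length) := by
  intro rs
  induction rs with
  | nil =>
    intro f num _ _
    simp only [List.map_nil, List.foldl_nil, List.length_nil, Nat.cast_zero, add_zero]
    rw [show gridOf N (fun r' c' => if r' ∈ ([] : List Int) ∧ c' = s - r' then val r' else f r' c')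
          = gridOf N f from gridOf_congr (by intro a b _ _ _ _; simp)]
  | cons r0 rest ih =>
    intro f num hb hv
    have hb0 := hb r0 List.mem_cons_self
    have hv0 : val r0 = num := by have := hv 0 (by simp); simpa using this
    simp only [List.map_cons, List.foldl_cons]
    have step : bzInner (gridOf N f, num) (r0, s - r0)
        = (gridOf N (fun r' c' => if r' = r0 ∧ c' = s - r0 then num else f r' c'), num + 1) := by
      unfold bzInner
      simp only
      rw [set2_gridOf hb0.1 hb0.2.1 hb0.2.2.1 hb0.2.2.2]
    rw [step]
    rw [ih _ (num + 1) (fun r hr => hb r (List.mem_cons_of_mem _ hr))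
        (by
          intro k hk
          have := hv (k + 1) (by simpa using Nat.succ_lt_succ hk)
          simp only [List.getElem_cons_succ] at this
          rw [this]; push_cast; ring)]
    rw [Prod.mk.injEq]
    constructor
    · apply gridOf_congr
      intro a b _ _ _ _
      by_cases hba : b = s - a
      · subst hba
        by_cases hmem : a ∈ rest
        · simp [hmem]
        · by_cases h3 : a = r0
          · subst h3; simp [hmem, hv0]
          · simp [hmem, h3]
      · have c2 : ¬(a = r0 ∧ b = s - r0) := by rintro ⟨rfl, rfl⟩; exact hba rfl
        simp [hba, c2]
    · simp only [List.length_cons]; push_cast; ring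

theorem bzBase_succ (N s : Int) (hs : s ≤ 2 * N - 2) :
    bzBase N (s + 1) = bzBase N s + (min (N - 1) s - max 0 (s - (N - 1)) + 1) := by
  unfold bzBase
  simp only [PySem.Int.floordiv_eq_ediv_of_pos (show (0:Int) < 2 by norm_num)]
  have he1 : (2:Int) ∣ s * (s + 1) := (Int.even_mul_succ_self s).two_dvd
  have he2 : (2:Int) ∣ (2 * N - 1 - (s+1)) * (2 * N - (s+1)) := by
    have := (Int.even_mul_succ_self (2 * N - 2 - s)).two_dvd
    have h : (2 * N - 2 - s) * (2 * N - 2 - s + 1) = (2 * N - 1 - (s+1)) * (2 * N - (s+1)) := by ring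
    rwa [h] at this
  split_ifs with h1 h2 h2
  · have hr : (s + 1) * (s + 1 + 1) = s * (s + 1) + 2 * (s + 1) := by ring
    omega
  · omega
  · have hsN : s = N := by omega
    subst hsN
    have hr1 : s * (s + 1) = s * s + s := by ring
    have hr2 : (2 * s - 1 - (s+1)) * (2 * s - (s+1)) = s * s - 3 * s + 2 := by ring
    omega
  · have hr : (2 * N - 1 - s) * (2 * N - s)
        = (2 * N - 1 - (s+1)) * (2 * N - (s+1)) + 2 * (2 * N - 1 - s) := by ring
    omega

theorem diag_step (N s : Int) (hs0 : 0 ≤ s) (hs : s ≤ 2 * N - 2) :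
    bzDiag N (gridOf N (pf N s), bzBase N s) s
      = (gridOf N (pf N (s + 1)), bzBase N (s + 1)) := by
  have hN : 1 ≤ N := by omega
  unfold bzDiag
  simp only
  set r_min := max 0 (s - (N - 1)) with hrmin
  set r_max := min (N - 1) s with hrmax
  have hmm : r_min ≤ r_max := by omega
  have hlenr : (PySem.List.pyRange r_min (r_max + 1) 1).length = (r_max + 1 - r_min).toNat :=
    PySem.List.length_pyRange_one _ _
  have hmod : PySem.Int.mod s 2 = s % 2 := PySem.Int.mod_eq_emod_of_pos (by norm_num)
  have hgrid : ∀ (rs : List Int), (∀ r, r ∈ rs ↔ r_min ≤ r ∧ r < r_max + 1) →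
      gridOf N (fun r' c' => if r' ∈ rs ∧ c' = s - r' then bzCell N r' (s - r') else pf N s r' c')
        = gridOf N (pf N (s + 1)) := by
    intro rs hmem
    apply gridOf_congr
    intro a b ha0 haN hb0 hbN
    by_cases hba : b = s - a
    · have hin : a ∈ rs := by rw [hmem]; omega
      rw [if_pos ⟨hin, hba⟩]
      have : a + b < s + 1 := by omega
      unfold pf
      rw [if_pos this, hba]
    · rw [if_neg (by rintro ⟨_, h⟩; exact hba h)]
      unfold pf
      by_cases hlt : a + b < s
      · rw [if_pos hlt, if_pos (by omega)]
      · rw [if_neg hlt, if_neg (by omega)]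
  by_cases hpar : s % 2 = 0
  · -- even diagonal: reversed
    have hcond : (PySem.Int.mod s 2 == 0) = true := by rw [hmod, hpar]; rfl
    rw [hcond, if_pos rfl]
    rw [← List.map_reverse]
    rw [write_fold N s (fun r => bzCell N r (s - r)) _ (pf N s) (bzBase N s)
        (by intro r hr; rw [List.mem_reverse, PySem.List.mem_pyRange_one] at hr; omega)
        (by
          intro k hk
          simp only [List.length_reverse, hlenr] at hk
          rw [List.getElem_reverse]
          rw [PySem.List.getElem_pyRange_one]
          have harg : r_min + ((PySem.List.pyRange r_min (r_max + 1) 1).length - 1 - k : Nat) = r_max - k := by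
            rw [hlenr]; omega
          rw [harg]
          unfold bzCell
          simp only
          have hsum : r_max - ↑k + (s - (r_max - ↑k)) = s := by ring
          rw [hsum, hmod]
          have : ¬ ((s % 2 == 1) = true) := by simp; omega
          simp only [this, if_false, Bool.false_eq_true]
          omega)]
    rw [Prod.mk.injEq]
    constructor
    · apply hgrid
      intro r
      rw [List.mem_reverse, PySem.List.mem_pyRange_one]
    · rw [bzBase_succ N s hs]
      simp only [List.length_reverse, hlenr]
      omega
  · -- odd diagonal
    have hpar1 : s % 2 = 1 := by omega
    have hcond : (PySem.Int.mod s 2 == 0) = false := by rw [hmod, hpar1]; rfl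
    rw [hcond, if_neg (by simp)]
    rw [write_fold N s (fun r => bzCell N r (s - r)) _ (pf N s) (bzBase N s)
        (by intro r hr; rw [PySem.List.mem_pyRange_one] at hr; omega)
        (by
          intro k hk
          rw [PySem.List.getElem_pyRange_one]
          unfold bzCell
          simp only
          have hsum : r_min + ↑k + (s - (r_min + ↑k)) = s := by ring
          rw [hsum, hmod]
          have : ((s % 2 == 1) = true) := by simp; omega
          simp only [this, if_true]
          omega)]
    rw [Prod.mk.injEq]
    constructor
    · apply hgrid
      intro r
      rw [PySem.List.mem_pyRange_one]
    · rw [bzBase_succ N s hs]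
      rw [hlenr]
      omega

theorem outer (N : Int) : ∀ (k : Nat), (k : Int) ≤ 2 * N - 1 →
    (PySem.List.pyRange 0 (k : Int) 1).foldl (bzDiag N) (gridOf N (pf N 0), 1)
      = (gridOf N (pf N (k : Int)), bzBase N (k : Int)) := by
  intro k
  induction k with
  | zero =>
    intro h
    rw [PySem.List.pyRange_one_eq_nil (by norm_num)]
    simp only [List.foldl_nil, Nat.cast_zero]
    have : bzBase N 0 = 1 := by
      unfold bzBase
      rw [if_pos (by omega), PySem.Int.floordiv_eq_ediv_of_pos (by norm_num)]
      norm_num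
    rw [this]
  | succ k ih =>
    intro h
    have hcast : ((k + 1 : Nat) : Int) = (k : Int) + 1 := by push_cast; ring
    rw [hcast]
    rw [PySem.List.pyRange_one_succ_right (by positivity)]
    rw [List.foldl_append, ih (by omega)]
    simp only [List.foldl_cons, List.foldl_nil]
    exact diag_step N k (by positivity) (by omega)

-- ===== VERDICT (by name: the statement is the Claim_ definition above) =====
theorem build_zigzag_spec : Claim_equal_build_zigzag := by
  intro N _
  unfold Spec_build_zigzag build_zigzag build_zigzag_alt
  by_cases hN : N ≤ 0
  · rw [PySem.List.pyRange_one_eq_nil (show (2*N-1 : Int) ≤ 0 by omega)]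
    rw [PySem.List.pyRange_one_eq_nil (show (N : Int) ≤ 0 by omega)]
    simp
  · have init : ((PySem.List.pyRange 0 N 1).map (fun _ => List.replicate N.toNat (0:Int)))
        = gridOf N (pf N 0) := by
      unfold gridOf
      apply List.map_congr_left
      intro r hr
      rw [PySem.List.mem_pyRange_one] at hr
      have h2 : (PySem.List.pyRange 0 N 1).map (fun c => pf N 0 r c)
          = (PySem.List.pyRange 0 N 1).map (fun _ => (0:Int)) :=
        List.map_congr_left (fun c hc => by
          rw [PySem.List.mem_pyRange_one] at hc
          unfold pf
          rw [if_neg (by omega)])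
      rw [h2, List.map_const']
      rw [PySem.List.length_pyRange_one]
      norm_num
    rw [init]
    have hk : (((2*N-1).toNat : Nat) : Int) = 2*N-1 := by omega
    have hout := outer N (2*N-1).toNat (by omega)
    rw [hk] at hout
    rw [hout]
    exact gridOf_congr (fun r c h1 h2 h3 h4 => by unfold pf; rw [if_pos (by omega)])
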